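-- pv_equiv track=rewrite | github.com/ZhenyuPU/AI_ECN | S1/ALGOA/Correction du TP Compression-20230901/bwt.py | find_rank_sorted
-- ===== SOURCE A (Python) =====
-- def find_rank_sorted(A, s, i):
--     e = i
--     while s < e:
--         m = (s + e) // 2
--         if A[m] == A[i]:
--             e = m
--         else:
--             s = m + 1
--
--     return i - e + 1
-- ===== SOURCE B (Python) =====
-- def find_rank_sorted(A, s, i):
--     if s >= i:
--         return 1
--     x = A[i]
--
--     def go(lo, n):
--         # search over the interval [lo, lo+n), tracked by its start and SIZE
--         if n <= 0:
--             return lo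
--         h = n // 2
--         if A[lo + h] == x:
--             return go(lo, h)
--         return go(lo + h + 1, n - h - 1)
--
--     return i - go(s, i - s) + 1
-- ===== Notes on version B (the rewrite author's own statement) =====
-- stated objective: alternative
-- what changed: A's iterative while-loop mutating the pair (s, e) is replaced by a recursive helper over (start, size) of the search interval that returns the final boundary, with A[i] read once and the rank computed once at the end.
-- outside the precondition, e.g. on find_rank_sorted([1, 2], -5, 1): A returns 1, B returns 1
import Mathlib
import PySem

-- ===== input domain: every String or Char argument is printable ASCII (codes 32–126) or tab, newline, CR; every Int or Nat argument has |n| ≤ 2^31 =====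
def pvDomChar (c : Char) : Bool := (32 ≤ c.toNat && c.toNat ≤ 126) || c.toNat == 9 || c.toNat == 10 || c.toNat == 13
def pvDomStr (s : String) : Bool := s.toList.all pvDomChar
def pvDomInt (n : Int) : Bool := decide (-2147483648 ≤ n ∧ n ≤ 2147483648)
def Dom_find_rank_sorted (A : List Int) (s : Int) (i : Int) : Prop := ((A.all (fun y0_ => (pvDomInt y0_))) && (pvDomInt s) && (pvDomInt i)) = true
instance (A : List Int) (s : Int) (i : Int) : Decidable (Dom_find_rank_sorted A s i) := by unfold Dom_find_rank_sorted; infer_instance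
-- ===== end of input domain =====

-- B replaces A's mutate-(s,e) while-loop by a recursive helper over (start, SIZE) of the
-- interval that returns the final boundary, reading A[i] once; objective: alternative.

-- ===== PORT A =====
-- A's while-loop on the mutable pair (s, e), as structural recursion on a fuel that
-- bounds the gap e - s (the gap shrinks every iteration, so the fuel never runs out
-- on the calls the port makes; fuel 0 returns the loop-exit value).
def findRankLoop (A : List Int) (i : Int) : Nat → Int → Int → Int
  | 0, _, e => i - e + 1
  | k + 1, s, e =>
    if s < e then
      let m := PySem.Int.floordiv (s + e) 2
      if PySem.List.pyGet? A m = PySem.List.pyGet? A i then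
        findRankLoop A i k s m
      else
        findRankLoop A i k (m + 1) e
    else
      i - e + 1

def find_rank_sorted (A : List Int) (s : Int) (i : Int) : Int :=
  findRankLoop A i (i - s).toNat s i

-- ===== PORT B =====
-- B's helper: recursion on the size n of the interval [lo, lo + n), x = A[i] read
-- once; the same fuel guard makes the recursion structural (fuel 0 returns lo, the
-- base-case value, and is never reached on the call the port makes).
def goAlt (A : List Int) (x : Option Int) : Nat → Int → Int → Int
  | 0, lo, _ => lo
  | k + 1, lo, n =>
    if n ≤ 0 then lo
    else
      let h := PySem.Int.floordiv n 2
      if PySem.List.pyGet? A (lo + h) = x then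
        goAlt A x k lo h
      else
        goAlt A x k (lo + h + 1) (n - h - 1)

def find_rank_sorted_alt (A : List Int) (s : Int) (i : Int) : Int :=
  if s ≥ i then 1
  else i - goAlt A (PySem.List.pyGet? A i) (i - s).toNat s (i - s) + 1

-- ===== PRECONDITION & SPEC =====
-- Pre_ excludes inputs on which the binary search can touch an index outside [-len, len)
-- and Python raises IndexError; the bound is conservative: on a few excluded inputs the
-- midpoints happen to stay in range via negative-index wraparound and A (and B alike)
-- still return a value.
def Pre_find_rank_sorted (A : List Int) (s : Int) (i : Int) : Prop :=
  s < i → (-(A.length : Int) ≤ s ∧ i < (A.length : Int))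
instance (A : List Int) (s : Int) (i : Int) : Decidable (Pre_find_rank_sorted A s i) := by
  unfold Pre_find_rank_sorted; infer_instance

def pvWitness_find_rank_sorted : List Int × Int × Int := ([2, 3, 3, 3, 5], 0, 3)

def Spec_find_rank_sorted (A : List Int) (s : Int) (i : Int) (out : Int) : Prop := out = find_rank_sorted_alt A s i
instance (A : List Int) (s : Int) (i : Int) (out : Int) : Decidable (Spec_find_rank_sorted A s i out) := by unfold Spec_find_rank_sorted; infer_instance

-- ===== CLAIM (what is proved, stated in full; the proofs are below) =====
def Claim_equal_find_rank_sorted : Prop := ∀ (A : List Int) (s : Int) (i : Int), Dom_find_rank_sorted A s i → Pre_find_rank_sorted A s i → Spec_find_rank_sorted A s i (find_rank_sorted A s i)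

-- ===== LEMMAS AND PROOFS =====

-- The two recursions compute the same value: A's (s, e) state corresponds to B's
-- (lo, n) = (s, e - s), since (s + e) // 2 = s + (e - s) // 2.
theorem findRankLoop_eq_goAlt (A : List Int) (i : Int) (k : Nat) :
    ∀ (s e : Int), s ≤ e → (e - s).toNat ≤ k →
      findRankLoop A i k s e = i - goAlt A (PySem.List.pyGet? A i) k s (e - s) + 1 := by
  induction k with
  | zero =>
    intro s e h1 h2
    have he : e = s := by omega
    subst he
    simp [findRankLoop, goAlt]
  | succ k ih =>
    intro s e h1 h2
    by_cases hlt : s < e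
    · have hb := PySem.Int.floordiv_two_mid_bounds h1
      have hfd : PySem.Int.floordiv (s + e) 2 = (s + e) / 2 :=
        PySem.Int.floordiv_eq_ediv_of_pos (by omega : (0:Int) < 2)
      have hfd2 : PySem.Int.floordiv (e - s) 2 = (e - s) / 2 :=
        PySem.Int.floordiv_eq_ediv_of_pos (by omega : (0:Int) < 2)
      have hmlt : PySem.Int.floordiv (s + e) 2 < e := by omega
      have hmid : s + PySem.Int.floordiv (e - s) 2 = PySem.Int.floordiv (s + e) 2 := by
        rw [hfd, hfd2]; omega
      rw [findRankLoop, if_pos hlt, goAlt, if_neg (by omega : ¬ e - s ≤ 0)]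
      dsimp only
      rw [hmid]
      by_cases hc : PySem.List.pyGet? A (PySem.Int.floordiv (s + e) 2) = PySem.List.pyGet? A i
      · rw [if_pos hc, if_pos hc,
           ih s (PySem.Int.floordiv (s + e) 2) (by omega) (by omega),
           show PySem.Int.floordiv (s + e) 2 - s = PySem.Int.floordiv (e - s) 2 by omega]
      · rw [if_neg hc, if_neg hc,
           ih (PySem.Int.floordiv (s + e) 2 + 1) e (by omega) (by omega),
           show e - (PySem.Int.floordiv (s + e) 2 + 1)
              = e - s - PySem.Int.floordiv (e - s) 2 - 1 by omega]
    · have he : e = s := by omega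
      subst he
      simp [findRankLoop, goAlt]

-- ===== VERDICT (by name: the statement is the Claim_ definition above) =====
theorem find_rank_sorted_spec : Claim_equal_find_rank_sorted := by
  intro A s i _ _
  unfold Spec_find_rank_sorted find_rank_sorted find_rank_sorted_alt
  by_cases h : s ≥ i
  · have h0 : (i - s).toNat = 0 := by omega
    rw [h0, if_pos h]
    simp [findRankLoop]
  · rw [if_neg h, findRankLoop_eq_goAlt A i (i - s).toNat s i (by omega) (by omega)]
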